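-- pv_equiv track=rewrite | github.com/mellowLoveGH/big_data_analysis_for_BaiduMaps | counter11/mapper.py | query_process01
-- ===== SOURCE A (Python) =====
-- def find_kv(tmp, k):
--     st = tmp.find(k)
--     if st<0:
--         return False, ""
--     L = len(k)
--     ed = tmp.find("&", st+L)
--     if ed<st:
--         return False, ""
--     return True, tmp[st+L:ed]
--
-- def query_process01(query_str):
--     ks = ["&resid=", "&prod=", "&cl=", "&wf=", "&ll_t=", "&ll_r=", "&ll_h=", "&ll_n=", "&s=", "&ll="]
--     dic = {}
--     for k in ks:
--         f, v = find_kv(query_str, k)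
--         if f:
--             dic[k[1:-1]] = v
--     return dic
-- ===== SOURCE B (Python) =====
-- def query_process01(query_str):
--     names = ["resid", "prod", "cl", "wf", "ll_t", "ll_r", "ll_h", "ll_n", "s", "ll"]
--     parts = query_str.split("&")
--     found = {}
--     # parts[1:-1]: a field must follow a '&' and be terminated by a '&' to count,
--     # so the leading chunk and the unterminated trailing chunk are skipped.
--     for seg in parts[1:-1]:
--         key, sep, val = seg.partition("=")
--         if sep and key in names and key not in found:
--             found[key] = val
--     return {n: found[n] for n in names if n in found}
-- ===== Notes on version B (the rewrite author's own statement) =====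
-- stated objective: faster
-- what changed: B splits the query string on '&' once and makes a single pass over the inner segments (partitioning each at its first '='), instead of A's ten separate whole-string find-scans (two per key); the fixed key order and first-occurrence-wins behaviour are kept by emitting the collected values in the fixed key list order.
import Mathlib
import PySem

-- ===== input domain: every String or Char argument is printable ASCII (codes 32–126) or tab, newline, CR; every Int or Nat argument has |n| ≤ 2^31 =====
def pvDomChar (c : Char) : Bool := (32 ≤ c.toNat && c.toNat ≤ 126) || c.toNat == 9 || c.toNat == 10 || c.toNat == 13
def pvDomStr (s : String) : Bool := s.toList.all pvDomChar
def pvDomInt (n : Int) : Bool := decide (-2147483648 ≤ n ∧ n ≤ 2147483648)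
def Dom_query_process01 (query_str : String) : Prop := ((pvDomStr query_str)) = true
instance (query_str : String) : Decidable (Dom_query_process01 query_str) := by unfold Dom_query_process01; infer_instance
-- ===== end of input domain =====

-- B replaces A's ten whole-string find-scans by one split("&") plus a single pass over the
-- inner segments (same return value; no mutation involved).

-- ===== PORT A =====
def find_kv (tmp k : String) : Bool × String :=
  let st := PySem.Str.find tmp k
  if st < 0 then (false, "")
  else
    let L := PySem.Str.len k
    let ed := PySem.Str.findFrom tmp "&" (st + L)
    if ed < st then (false, "")
    else (true, PySem.Str.slice tmp (some (st + L)) (some ed))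

def query_process01 (query_str : String) : List (String × String) :=
  let ks : List String := ["&resid=", "&prod=", "&cl=", "&wf=", "&ll_t=", "&ll_r=", "&ll_h=", "&ll_n=", "&s=", "&ll="]
  (ks.foldl (fun (dic : PySem.Dict String String) k =>
      let fv := find_kv query_str k
      if fv.1 then dic.insert (PySem.Str.slice k (some 1) (some (-1))) fv.2 else dic)
    PySem.Dict.empty).items

-- ===== PORT B =====
-- hand port of seg.partition("=") for the one-char separator '=' (exact: none ↔ no '=' in seg,
-- otherwise the chars before / after the first '=')
def partEqC : List Char → Option (List Char × List Char)
  | [] => none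
  | c :: t => if c = '=' then some ([], t) else (partEqC t).map (fun p => (c :: p.1, p.2))

def query_process01_alt (query_str : String) : List (String × String) :=
  let names : List String := ["resid", "prod", "cl", "wf", "ll_t", "ll_r", "ll_h", "ll_n", "s", "ll"]
  let parts : List String :=
    match PySem.Str.split? query_str "&" with
    | some ps => ps
    | none => []
  let inner := PySem.List.slice parts (some 1) (some (-1))
  let found := inner.foldl (fun (d : PySem.Dict String String) seg =>
      match partEqC seg.toList with
      | some p =>
          let key := String.ofList p.1
          if names.contains key && !(d.contains key) then d.insert key (String.ofList p.2) else d
      | none => d) PySem.Dict.empty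
  (names.foldl (fun (r : PySem.Dict String String) n =>
      match found.get? n with
      | some v => r.insert n v
      | none => r) PySem.Dict.empty).items

-- ===== PRECONDITION & SPEC =====
def Spec_query_process01 (query_str : String) (out : List (String × String)) : Prop := out = query_process01_alt query_str
instance (query_str : String) (out : List (String × String)) : Decidable (Spec_query_process01 query_str out) := by unfold Spec_query_process01; infer_instance

-- ===== CLAIM (what is proved, stated in full; the proofs are below) =====
def Claim_equal_query_process01 : Prop := ∀ (query_str : String), Dom_query_process01 query_str → Spec_query_process01 query_str (query_process01 query_str)

-- ===== LEMMAS AND PROOFS =====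

theorem pv_find_nil (sub : List Char) (h : sub ≠ []) : PySem.Chars.find [] sub = -1 := by
  rw [PySem.Chars.find_eq_neg_one_iff]
  simp [List.infix_nil, h]

theorem pv_prefix_drop_infix (sub s : List Char) (j : Nat) (h : sub <+: s.drop j) : sub <:+: s :=
  h.isInfix.trans (List.drop_suffix j s).isInfix

theorem pv_find_eq_coe_iff (s sub : List Char) (j : Nat) :
    PySem.Chars.find s sub = (j : Int) ↔ (sub <+: s.drop j ∧ ∀ i < j, ¬ sub <+: s.drop i) := by
  constructor
  · intro h
    have hnn : (0:Int) ≤ PySem.Chars.find s sub := by rw [h]; positivity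
    have hspec := PySem.Chars.find_spec (s := s) (sub := sub) hnn
    have hj : (PySem.Chars.find s sub).toNat = j := by omega
    rw [hj] at hspec
    exact hspec
  · rintro ⟨hp, hmin⟩
    have hinf : sub <:+: s := pv_prefix_drop_infix sub s j hp
    have hnn : (0:Int) ≤ PySem.Chars.find s sub := (PySem.Chars.find_nonneg_iff s sub).2 hinf
    have hspec := PySem.Chars.find_spec (s := s) (sub := sub) hnn
    have : (PySem.Chars.find s sub).toNat = j := by
      by_contra hne
      rcases Nat.lt_or_ge (PySem.Chars.find s sub).toNat j with hlt | hge
      · exact hmin _ hlt hspec.1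
      · exact hspec.2 j (by omega) hp
    omega

theorem pv_find_eq_zero_of_prefix (s sub : List Char) (h : sub <+: s) : PySem.Chars.find s sub = 0 := by
  have := (pv_find_eq_coe_iff s sub 0).2 ⟨by simpa using h, by omega⟩
  simpa using this

theorem pv_find_amp_free (s : List Char) (h : '&' ∉ s) : PySem.Chars.find s ['&'] = -1 := by
  rw [PySem.Chars.find_eq_neg_one_iff]
  intro hinf
  exact h (hinf.mem (by simp))

theorem pv_find_amp_append (u v : List Char) (h : '&' ∉ u) :
    PySem.Chars.find (u ++ '&' :: v) ['&'] = (u.length : Int) := by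
  rw [pv_find_eq_coe_iff]
  constructor
  · simp
  · intro i hi hp
    rcases hp with ⟨t, ht⟩
    rw [List.drop_append_of_le_length (by omega)] at ht
    cases hu : u.drop i with
    | nil => have := congrArg List.length hu; simp at this; omega
    | cons x r =>
      rw [hu] at ht
      simp at ht
      exact h (ht.1 ▸ List.mem_of_mem_drop (hu ▸ List.mem_cons_self))

theorem pv_find_cons_of_not_prefix (c : Char) (t sub : List Char)
    (h : ¬ sub <+: (c :: t)) (h2 : sub <:+: t) :
    PySem.Chars.find (c :: t) sub = 1 + PySem.Chars.find t sub := by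
  have hnn : (0:Int) ≤ PySem.Chars.find t sub := (PySem.Chars.find_nonneg_iff t sub).2 h2
  have hspec := PySem.Chars.find_spec (s := t) (sub := sub) hnn
  have : PySem.Chars.find (c :: t) sub = (((PySem.Chars.find t sub).toNat + 1 : Nat) : Int) := by
    rw [pv_find_eq_coe_iff]
    constructor
    · simpa using hspec.1
    · intro i hi
      match i with
      | 0 => simpa using h
      | i + 1 =>
        have := hspec.2 i (by omega)
        simpa using this
  omega

def tailVal (rest : List Char) : Option (List Char) :=
  if PySem.Chars.find rest ['&'] = -1 then none
  else some (rest.take (PySem.Chars.find rest ['&']).toNat)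

def Fref : List Char → List Char → Option (List Char)
  | [], _ => none
  | c :: t, name =>
    if ('&' :: (name ++ ['='])).isPrefixOf (c :: t) then tailVal ((c :: t).drop (name.length + 2))
    else Fref t name

theorem pv_find_kv_eq (s name : List Char) :
    find_kv (String.ofList s) (String.ofList ('&' :: (name ++ ['=']))) =
      (match Fref s name with
       | some v => (true, String.ofList v)
       | none => (false, "")) := by
  induction s with
  | nil =>
    have h1 : PySem.Chars.find ([] : List Char) ('&' :: (name ++ ['='])) = -1 :=
      pv_find_nil _ (by simp)
    simp [find_kv, Fref, h1]
  | cons c t ih =>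
    by_cases hp : ('&' :: (name ++ ['='])).isPrefixOf (c :: t)
    · -- key matches at position 0
      have hpre : ('&' :: (name ++ ['='])) <+: (c :: t) := List.isPrefixOf_iff_prefix.1 hp
      have hst : PySem.Chars.find (c :: t) ('&' :: (name ++ ['='])) = 0 :=
        pv_find_eq_zero_of_prefix _ _ hpre
      have hlen : name.length + 2 ≤ (c :: t).length := by
        have := hpre.length_le; simp at this ⊢; omega
      have hff := PySem.Chars.findFrom_natCast (c :: t) ['&'] (name.length + 2) hlen
      have hL : PySem.Str.len (String.ofList ('&' :: (name ++ ['=']))) = ((name.length + 2 : Nat) : Int) := by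
        simp [PySem.Str.len]; push_cast; ring_nf
      push_cast at hff
      simp only [find_kv, Fref, hp, if_pos, PySem.Str.find_eq, PySem.Str.findFrom_eq,
        String.toList_ofList, hst, hL]
      set rest := (c :: t).drop (name.length + 2) with hrest
      by_cases hf : PySem.Chars.find rest ['&'] = -1
      · -- no terminating '&'
        push_cast [hf] at hff
        simp [tailVal, hf, hff]
      · have hge : (0:Int) ≤ PySem.Chars.find rest ['&'] := by
          have := PySem.Chars.neg_one_le_find rest ['&']
          omega
        push_cast [if_neg hf] at hff
        simp [tailVal, hf, hff, PySem.Str.slice]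
        rw [if_neg (by omega)]
        have h1 : (↑name.length + 2 : Int) = ((name.length + 2 : Nat) : Int) := by push_cast; ring
        have h2 : PySem.Chars.find rest ['&'] = (((PySem.Chars.find rest ['&']).toNat : Nat) : Int) :=
          (Int.toNat_of_nonneg hge).symm
        rw [h1, h2, PySem.List.slice_natCast_add]
        simp [hrest]
        congr 2
        omega
    · -- no match at position 0: behaves as on t
      have hnp : ¬ ('&' :: (name ++ ['='])) <+: (c :: t) := by
        simpa [List.isPrefixOf_iff_prefix] using hp
      have step : find_kv (String.ofList (c :: t)) (String.ofList ('&' :: (name ++ ['=']))) =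
          find_kv (String.ofList t) (String.ofList ('&' :: (name ++ ['=']))) := by
        by_cases hinf : ('&' :: (name ++ ['='])) <:+: (c :: t)
        · -- first occurrence is inside t
          have hisin : PySem.Chars.isIn ('&' :: (name ++ ['='])) (c :: t) = true :=
            (PySem.Chars.isIn_iff_infix _ _).2 hinf
          obtain ⟨j, hj⟩ := (PySem.Chars.exists_prefix_drop_iff_isIn (sub := '&' :: (name ++ ['='])) (s := c :: t)).2 hisin
          match j, hj with
          | 0, hj => exact absurd (by simpa using hj) hnp
          | j + 1, hj =>
          have hinft : ('&' :: (name ++ ['='])) <:+: t := pv_prefix_drop_infix _ _ j (by simpa using hj)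
          have hcons := pv_find_cons_of_not_prefix c t _ hnp hinft
          have hnn : (0:Int) ≤ PySem.Chars.find t ('&' :: (name ++ ['='])) :=
            (PySem.Chars.find_nonneg_iff _ _).2 hinft
          set st' := PySem.Chars.find t ('&' :: (name ++ ['='])) with hst'
          have hspec := PySem.Chars.find_spec (s := t) (sub := '&' :: (name ++ ['='])) hnn
          have hlent : st'.toNat + (name.length + 2) ≤ t.length := by
            have := hspec.1.length_le
            simp at this
            omega
          set rest := t.drop (st'.toNat + (name.length + 2)) with hrest
          have hff1 := PySem.Chars.findFrom_natCast (c :: t) ['&'] (st'.toNat + (name.length + 2) + 1)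
            (by simp; omega)
          have hff2 := PySem.Chars.findFrom_natCast t ['&'] (st'.toNat + (name.length + 2)) hlent
          have hd1 : List.drop (st'.toNat + (name.length + 2) + 1) (c :: t) = rest := by
            simp [hrest]
          have hd2 : List.drop (st'.toNat + (name.length + 2)) t = rest := rfl
          rw [hd1] at hff1
          rw [hd2] at hff2
          have hL : PySem.Str.len (String.ofList ('&' :: (name ++ ['=']))) = ((name.length + 2 : Nat) : Int) := by
            simp [PySem.Str.len]; push_cast; ring_nf
          have hstnat : st' = (st'.toNat : Int) := (Int.toNat_of_nonneg hnn).symm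
          have e1 : (1 + st' + ((name.length + 2 : Nat) : Int)) = ((st'.toNat + (name.length + 2) + 1 : Nat) : Int) := by
            push_cast; omega
          have e2 : (st' + ((name.length + 2 : Nat) : Int)) = ((st'.toNat + (name.length + 2) : Nat) : Int) := by
            push_cast; omega
          by_cases hf : PySem.Chars.find rest ['&'] = -1
          · rw [if_pos hf] at hff1 hff2
            simp only [find_kv, PySem.Str.find_eq, PySem.Str.findFrom_eq, String.toList_ofList,
              hcons, ← hst', hL, show ("&" : String).toList = ['&'] from rfl]
            rw [e1, e2, hff1, hff2]
            rw [if_neg (by omega), if_pos (by omega), if_neg (by omega), if_pos (by omega)]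
          · have hge : (0:Int) ≤ PySem.Chars.find rest ['&'] := by
              have := PySem.Chars.neg_one_le_find rest ['&']
              omega
            rw [if_neg hf] at hff1 hff2
            simp only [find_kv, PySem.Str.find_eq, PySem.Str.findFrom_eq, String.toList_ofList,
              hcons, ← hst', hL, show ("&" : String).toList = ['&'] from rfl]
            rw [e1, e2, hff1, hff2]
            rw [if_neg (by omega), if_neg (by omega), if_neg (by omega), if_neg (by omega)]
            have h2 : PySem.Chars.find rest ['&'] = (((PySem.Chars.find rest ['&']).toNat : Nat) : Int) :=
              (Int.toNat_of_nonneg hge).symm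
            simp only [PySem.Str.slice, String.toList_ofList, PySem.Chars.slice_eq_listSlice]
            rw [h2, PySem.List.slice_natCast_add, PySem.List.slice_natCast_add, hd1, hd2]
        · -- key occurs nowhere
          have hinft : ¬ ('&' :: (name ++ ['='])) <:+: t := fun h =>
            hinf (h.trans (List.suffix_cons c t).isInfix)
          have h1 : PySem.Chars.find (c :: t) ('&' :: (name ++ ['='])) = -1 :=
            (PySem.Chars.find_eq_neg_one_iff _ _).2 hinf
          have h2 : PySem.Chars.find t ('&' :: (name ++ ['='])) = -1 :=
            (PySem.Chars.find_eq_neg_one_iff _ _).2 hinft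
          simp [find_kv, h1, h2]
      rw [step, ih]
      simp only [Fref, hp, Bool.false_eq_true, if_false]

def mySplit : List Char → List (List Char)
  | [] => [[]]
  | c :: t => if c = '&' then [] :: mySplit t else (mySplit t).modifyHead (c :: ·)

theorem pv_mySplit_ne_nil (s : List Char) : mySplit s ≠ [] := by
  induction s with
  | nil => simp [mySplit]
  | cons c t ih =>
    simp only [mySplit]
    split_ifs
    · simp
    · cases h : mySplit t with
      | nil => exact absurd h ih
      | cons a l => simp [List.modifyHead]

theorem pv_splitOn_go (fuel : Nat) (l cur : List Char) (acc : List (List Char))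
    (h : l.length ≤ fuel) :
    PySem.Chars.splitOn.go ['&'] fuel l cur acc =
      acc.reverse ++ ((mySplit l).modifyHead (cur.reverse ++ ·)) := by
  induction fuel generalizing l cur acc with
  | zero =>
    match l, h with
    | [], _ => simp [PySem.Chars.splitOn.go, mySplit]
  | succ fuel ih =>
    match l with
    | [] => simp [PySem.Chars.splitOn.go, mySplit]
    | c :: rest =>
      rw [PySem.Chars.splitOn.go]
      by_cases hc : c = '&'
      · subst hc
        have hpre : (['&'].isPrefixOf ('&' :: rest)) = true := by simp [List.isPrefixOf]
        rw [if_pos hpre]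
        rw [ih _ _ _ (by simpa using Nat.le_of_succ_le_succ (by simpa using h))]
        simp [mySplit, List.modifyHead]
        cases mySplit rest <;> simp
      · have hpre : (['&'].isPrefixOf (c :: rest)) = false := by
          simp only [List.isPrefixOf, Bool.and_eq_false_iff, beq_eq_false_iff_ne, ne_eq]
          exact Or.inl fun hh => hc hh.symm
        rw [if_neg (by simp [hpre])]
        rw [ih _ _ _ (by simp at h ⊢; omega)]
        simp only [mySplit, if_neg hc]
        cases hms : mySplit rest with
        | nil => exact absurd hms (pv_mySplit_ne_nil rest)
        | cons a l => simp [List.modifyHead]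

theorem pv_splitOn_eq_mySplit (s : List Char) : PySem.Chars.splitOn s ['&'] = mySplit s := by
  rw [PySem.Chars.splitOn, pv_splitOn_go _ _ _ _ (by omega)]
  cases h : mySplit s with
  | nil => exact absurd h (pv_mySplit_ne_nil s)
  | cons a l => simp [List.modifyHead]

theorem pv_mySplit_singleton (r h : List Char) (hs : mySplit r = [h]) : r = h ∧ '&' ∉ r := by
  induction r generalizing h with
  | nil => simp [mySplit] at hs; subst hs; simp
  | cons c t ih =>
    simp only [mySplit] at hs
    split_ifs at hs with hc
    · simp at hs
      exact absurd hs.2 (pv_mySplit_ne_nil t)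
    · cases hms : mySplit t with
      | nil => exact absurd hms (pv_mySplit_ne_nil t)
      | cons a l =>
        rw [hms] at hs
        simp [List.modifyHead] at hs
        obtain ⟨h1, h2⟩ := hs
        obtain ⟨rfl, hnm⟩ := ih a (by rw [hms, h2])
        constructor
        · exact h1
        · simp [hnm]
          exact fun hh => hc hh.symm

theorem pv_mySplit_structure (r h : List Char) (tl : List (List Char)) (hs : mySplit r = h :: tl)
    (hne : tl ≠ []) : ∃ r₂, r = h ++ '&' :: r₂ ∧ '&' ∉ h ∧ mySplit r₂ = tl := by
  induction r generalizing h tl with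
  | nil =>
    simp [mySplit] at hs
    exact absurd hs.2 hne
  | cons c t ih =>
    simp only [mySplit] at hs
    split_ifs at hs with hc
    · rw [List.cons_eq_cons] at hs
      obtain ⟨h1, h2⟩ := hs
      subst h1
      exact ⟨t, by simp [hc], by simp, h2⟩
    · cases hms : mySplit t with
      | nil => exact absurd hms (pv_mySplit_ne_nil t)
      | cons a l =>
        rw [hms] at hs
        simp [List.modifyHead] at hs
        obtain ⟨h1, rfl⟩ := hs
        obtain ⟨r₂, rfl, hna, hms₂⟩ := ih a l hms hne
        refine ⟨r₂, by simp [← h1], ?_, hms₂⟩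
        rw [← h1]
        simp [hna]
        exact fun hh => hc hh.symm

def refLookup : List (List Char) → List Char → Option (List Char)
  | [], _ => none
  | seg :: rest, name =>
    if (name ++ ['=']).isPrefixOf seg then some (seg.drop (name.length + 1)) else refLookup rest name

theorem pv_key_not_prefix (name t : List Char) (c : Char) (hc : c ≠ '&') :
    (('&' :: (name ++ ['='])).isPrefixOf (c :: t)) = false := by
  apply Bool.eq_false_iff.2
  intro hpf
  have h := List.isPrefixOf_iff_prefix.1 hpf
  exact hc ((List.cons_prefix_cons.1 h).1.symm)

theorem pv_Fref_amp_free (s name : List Char) (h : '&' ∉ s) : Fref s name = none := by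
  induction s with
  | nil => rfl
  | cons c t ih =>
    have hc : c ≠ '&' := fun hh => h (hh ▸ List.mem_cons_self)
    have hnp := pv_key_not_prefix name t c hc
    simp only [Fref, hnp, Bool.false_eq_true, if_false]
    exact ih (fun hm => h (List.mem_cons_of_mem c hm))

theorem pv_Fref_skip (a b name : List Char) (h : '&' ∉ a) : Fref (a ++ b) name = Fref b name := by
  induction a with
  | nil => rfl
  | cons c t ih =>
    have hc : c ≠ '&' := fun hh => h (hh ▸ List.mem_cons_self)
    have hnp := pv_key_not_prefix name (t ++ b) c hc
    simp only [List.cons_append, Fref, hnp, Bool.false_eq_true, if_false]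
    exact ih (fun hm => h (List.mem_cons_of_mem c hm))

theorem pv_span_prefix (w a b : List Char) (hw : '&' ∉ w) (ha : '&' ∉ a) :
    w <+: (a ++ '&' :: b) ↔ w <+: a := by
  induction a generalizing w with
  | nil =>
    cases w with
    | nil => simp
    | cons x w' =>
      simp only [List.nil_append, List.cons_prefix_cons]
      constructor
      · rintro ⟨rfl, -⟩
        exact absurd List.mem_cons_self hw
      · intro h
        exact absurd h (by simp)
  | cons y a' ih =>
    cases w with
    | nil => simp
    | cons x w' =>
      simp only [List.cons_append, List.cons_prefix_cons]
      rw [ih w' (fun hm => hw (List.mem_cons_of_mem x hm)) (fun hm => ha (List.mem_cons_of_mem y hm))]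

theorem pv_wne (name : List Char) : name ++ ['='] ≠ [] := by simp

theorem pv_w_no_amp (name : List Char) (h1 : '&' ∉ name) : '&' ∉ name ++ ['='] := by
  simp [h1]

theorem pv_nonempty_not_prefix_nil (w : List Char) (hw : w ≠ []) :
    (w.isPrefixOf ([] : List Char)) = false := by
  apply Bool.eq_false_iff.2
  intro hpf
  have h := List.isPrefixOf_iff_prefix.1 hpf
  simp [List.prefix_nil] at h
  exact hw h

theorem pv_key_not_prefix_amp (name r : List Char) (hn : name ≠ []) (h1 : '&' ∉ name) :
    (('&' :: (name ++ ['='])).isPrefixOf ('&' :: '&' :: r)) = false := by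
  apply Bool.eq_false_iff.2
  intro hpf
  have h := List.isPrefixOf_iff_prefix.1 hpf
  have h2 := (List.cons_prefix_cons.1 h).2
  cases name with
  | nil => exact hn rfl
  | cons n0 nt =>
    have h3 := (List.cons_prefix_cons.1 (by simpa using h2)).1
    exact h1 (by simp only [List.mem_cons]; exact Or.inl h3.symm)

theorem pv_refLookup_dropLast_fuel (n : Nat) (t name : List Char) (hlen : t.length ≤ n)
    (hn : name ≠ []) (h1 : '&' ∉ name) (h2 : '=' ∉ name) :
    refLookup ((mySplit t).dropLast) name = Fref ('&' :: t) name := by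
  induction n generalizing t with
  | zero =>
    match t, hlen with
    | [], _ =>
      have hp : (('&' :: (name ++ ['='])).isPrefixOf ['&']) = false := by
        apply Bool.eq_false_iff.2
        intro hpf
        have := (List.isPrefixOf_iff_prefix.1 hpf).length_le
        simp at this
      simp [mySplit, refLookup, Fref, hp]
  | succ n ih =>
    match t with
    | [] =>
      have hp : (('&' :: (name ++ ['='])).isPrefixOf ['&']) = false := by
        apply Bool.eq_false_iff.2
        intro hpf
        have := (List.isPrefixOf_iff_prefix.1 hpf).length_le
        simp at this
      simp [mySplit, refLookup, Fref, hp]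
    | '&' :: r =>
      have hM := pv_mySplit_ne_nil r
      have hd : (mySplit ('&' :: r)).dropLast = [] :: (mySplit r).dropLast := by
        simp only [mySplit]
        exact List.dropLast_cons_of_ne_nil hM
      rw [hd]
      simp only [refLookup, pv_nonempty_not_prefix_nil _ (pv_wne name), Bool.false_eq_true, if_false]
      rw [ih r (by simp at hlen; omega)]
      have hp := pv_key_not_prefix_amp name r hn h1
      conv_rhs => rw [Fref]
      rw [hp]
      simp
    | c :: r =>
      by_cases hc : c = '&'
      · subst hc
        have hM := pv_mySplit_ne_nil r
        have hd : (mySplit ('&' :: r)).dropLast = [] :: (mySplit r).dropLast := by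
          simp only [mySplit]
          exact List.dropLast_cons_of_ne_nil hM
        rw [hd]
        simp only [refLookup, pv_nonempty_not_prefix_nil _ (pv_wne name), Bool.false_eq_true, if_false]
        rw [ih r (by simp at hlen; omega)]
        have hp := pv_key_not_prefix_amp name r hn h1
        conv_rhs => rw [Fref]
        rw [hp]
        simp
      · cases hms : mySplit r with
        | nil => exact absurd hms (pv_mySplit_ne_nil r)
        | cons a l =>
          have hsplit_t : mySplit (c :: r) = (c :: a) :: l := by
            simp only [mySplit, if_neg hc, hms, List.modifyHead]
          cases l with
          | nil =>
            -- r is '&'-free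
            obtain ⟨rfl, hfree⟩ := pv_mySplit_singleton r a hms
            have hfree' : '&' ∉ c :: r := by
              simp [hfree]
              exact fun hh => hc hh.symm
            rw [hsplit_t]
            simp only [List.dropLast_singleton, refLookup]
            conv_rhs => rw [Fref]
            by_cases hp : (('&' :: (name ++ ['='])).isPrefixOf ('&' :: c :: r))
            · rw [if_pos hp]
              have hrest : '&' ∉ ('&' :: c :: r).drop (name.length + 2) := by
                intro hm
                simp only [List.drop_succ_cons] at hm
                exact hfree (List.mem_of_mem_drop hm)
              have hfr : PySem.Chars.find (List.drop name.length r) ['&'] = -1 :=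
                pv_find_amp_free _ (fun hm => hfree (List.mem_of_mem_drop hm))
              simp [tailVal, hfr]
            · rw [if_neg hp]
              exact (pv_Fref_amp_free _ name hfree').symm
          | cons a' l' =>
            obtain ⟨r₂, rfl, hna, hms₂⟩ := pv_mySplit_structure r a (a' :: l') hms (by simp)
            have hnca : '&' ∉ c :: a := by
              simp [hna]
              exact fun hh => hc hh.symm
            have hwamp := pv_w_no_amp name h1
            have hdrop : (mySplit (c :: (a ++ '&' :: r₂))).dropLast =
                (c :: a) :: (mySplit r₂).dropLast := by
              rw [hsplit_t, ← hms₂]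
              exact List.dropLast_cons_of_ne_nil (pv_mySplit_ne_nil r₂)
            rw [hdrop]
            have hlen₂ : r₂.length ≤ n := by
              simp at hlen
              omega
            have hspan : (name ++ ['=']) <+: (c :: (a ++ '&' :: r₂)) ↔ (name ++ ['=']) <+: (c :: a) := by
              have := pv_span_prefix (name ++ ['=']) (c :: a) r₂ hwamp hnca
              simpa using this
            conv_rhs => rw [Fref]
            by_cases hp : (name ++ ['=']).isPrefixOf (c :: a)
            · have hpre : (name ++ ['=']) <+: (c :: a) := List.isPrefixOf_iff_prefix.1 hp
              have hkey : (('&' :: (name ++ ['='])).isPrefixOf ('&' :: c :: (a ++ '&' :: r₂))) = true := by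
                rw [List.isPrefixOf_iff_prefix, List.cons_prefix_cons]
                exact ⟨rfl, hspan.2 hpre⟩
              rw [hkey]
              simp only [if_pos]
              rw [refLookup, if_pos hp]
              -- value
              have hlw : name.length + 1 ≤ (c :: a).length := by
                have := hpre.length_le
                simp at this ⊢
                omega
              have hdr : ('&' :: c :: (a ++ '&' :: r₂)).drop (name.length + 2) =
                  ((c :: a).drop (name.length + 1)) ++ '&' :: r₂ := by
                have : ('&' :: c :: (a ++ '&' :: r₂)).drop (name.length + 2) =
                    ((c :: a) ++ '&' :: r₂).drop (name.length + 1) := by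
                  simp
                rw [this, List.drop_append_of_le_length hlw]
              rw [hdr]
              have hu : '&' ∉ (c :: a).drop (name.length + 1) := by
                intro hm
                exact hnca (List.mem_of_mem_drop hm)
              have hfind := pv_find_amp_append _ ('&' :: r₂).tail hu
              simp only [List.tail_cons] at hfind
              rw [tailVal, hfind]
              rw [if_neg (by omega)]
              congr 1
              rw [Int.toNat_natCast, List.take_left]
            · have hkey : (('&' :: (name ++ ['='])).isPrefixOf ('&' :: c :: (a ++ '&' :: r₂))) = false := by
                apply Bool.eq_false_iff.2
                intro hpf
                have h := (List.cons_prefix_cons.1 (List.isPrefixOf_iff_prefix.1 hpf)).2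
                exact hp (List.isPrefixOf_iff_prefix.2 (hspan.1 h))
              rw [hkey]
              simp only [Bool.false_eq_true, if_false]
              rw [refLookup, if_neg (by simp [hp])]
              rw [ih r₂ hlen₂]
              have : Fref (c :: (a ++ '&' :: r₂)) name = Fref ('&' :: r₂) name := by
                have := pv_Fref_skip (c :: a) ('&' :: r₂) name hnca
                simpa using this
              rw [this]

theorem pv_refLookup_inner (s name : List Char) (hn : name ≠ []) (h1 : '&' ∉ name) (h2 : '=' ∉ name) :
    refLookup ((mySplit s).tail.dropLast) name = Fref s name := by
  cases s with
  | nil => simp [mySplit, refLookup, Fref]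
  | cons c t =>
    by_cases hc : c = '&'
    · subst hc
      simp only [mySplit]
      exact pv_refLookup_dropLast_fuel t.length t name le_rfl hn h1 h2
    · cases hms : mySplit t with
      | nil => exact absurd hms (pv_mySplit_ne_nil t)
      | cons a l =>
        have hsplit_t : mySplit (c :: t) = (c :: a) :: l := by
          simp only [mySplit, if_neg hc, hms, List.modifyHead]
        rw [hsplit_t, List.tail_cons]
        have hFr : Fref (c :: t) name = Fref t name := by
          rw [Fref, pv_key_not_prefix name t c hc]
          simp
        rw [hFr, ← pv_refLookup_inner t name hn h1 h2, hms, List.tail_cons]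
termination_by s.length
decreasing_by simp only [List.length_cons]; omega

theorem pv_partEqC_none (l : List Char) : partEqC l = none ↔ '=' ∉ l := by
  induction l with
  | nil => simp [partEqC]
  | cons c t ih =>
    simp only [partEqC]
    split_ifs with hc
    · subst hc; simp
    · rw [Option.map_eq_none_iff, ih]
      simp only [List.mem_cons, not_or]
      constructor
      · intro h
        exact ⟨fun hh => hc hh.symm, h⟩
      · intro h
        exact h.2

theorem pv_partEqC_some (l a b : List Char) : partEqC l = some (a, b) ↔ (l = a ++ '=' :: b ∧ '=' ∉ a) := by
  induction l generalizing a b with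
  | nil => simp [partEqC]
  | cons c t ih =>
    simp only [partEqC]
    split_ifs with hc
    · subst hc
      constructor
      · intro h
        simp only [Option.some_inj, Prod.mk.injEq] at h
        obtain ⟨h1, h2⟩ := h
        subst h1; subst h2
        simp
      · rintro ⟨h1, h2⟩
        cases a with
        | nil =>
          simp only [List.nil_append, List.cons.injEq] at h1
          simp [h1.2]
        | cons x a' =>
          simp only [List.cons_append, List.cons.injEq] at h1
          exact absurd (by simp only [List.mem_cons]; exact Or.inl h1.1) h2
    · constructor
      · intro h
        simp only [Option.map_eq_some_iff] at h
        obtain ⟨⟨a', b'⟩, hp, he⟩ := h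
        simp only [Prod.mk.injEq] at he
        obtain ⟨ha, hb⟩ := he
        obtain ⟨h1, h2⟩ := (ih a' b').1 hp
        subst hb
        constructor
        · rw [← ha, h1]; rfl
        · rw [← ha]
          simp only [List.mem_cons, not_or]
          exact ⟨fun hh => hc hh.symm, h2⟩
      · rintro ⟨h1, h2⟩
        cases a with
        | nil =>
          simp only [List.nil_append, List.cons.injEq] at h1
          exact absurd h1.1 hc
        | cons x a' =>
          simp only [List.cons_append, List.cons.injEq] at h1
          obtain ⟨rfl, h1⟩ := h1
          have := (ih a' b).2 ⟨h1, fun hm => h2 (List.mem_cons_of_mem _ hm)⟩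
          simp [this]

theorem pv_eqfree_unique (a n b t : List Char) (ha : '=' ∉ a) (hn : '=' ∉ n)
    (h : n ++ '=' :: t = a ++ '=' :: b) : n = a ∧ t = b := by
  induction a generalizing n with
  | nil =>
    cases n with
    | nil => simp_all
    | cons x n' =>
      simp at h
      exact absurd (by simp [h.1]) hn
  | cons c a' ih =>
    cases n with
    | nil =>
      simp at h
      exact absurd (by simp [← h.1]) ha
    | cons x n' =>
      simp at h
      obtain ⟨rfl, h⟩ := h
      obtain ⟨h1, h2⟩ := ih n' (fun hm => hn (List.mem_cons_of_mem _ hm)) h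
        (ha := fun hm => ha (List.mem_cons_of_mem _ hm))
      exact ⟨by rw [h1], h2⟩

theorem pv_slice_one_neg_one {α : Type} (xs : List α) :
    PySem.List.slice xs (some 1) (some (-1)) = xs.tail.dropLast := by
  cases xs with
  | nil => rfl
  | cons x l =>
    simp [PySem.List.slice, PySem.List.clampIdx, List.dropLast_eq_take]
    rw [if_neg (by omega)]
    omega

theorem pv_foldB_get? (segs : List String) (namesL : List String) (d : PySem.Dict String String)
    (name : List Char) (hmem : String.ofList name ∈ namesL) (h2 : '=' ∉ name) :
    (segs.foldl (fun (d : PySem.Dict String String) seg =>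
        match partEqC seg.toList with
        | some p =>
            let key := String.ofList p.1
            if namesL.contains key && !(d.contains key) then d.insert key (String.ofList p.2) else d
        | none => d) d).get? (String.ofList name) =
      ((d.get? (String.ofList name)).or
        (Option.map String.ofList (refLookup (segs.map String.toList) name))) := by
  induction segs generalizing d with
  | nil =>
    simp only [List.foldl_nil, List.map_nil, refLookup, Option.map_none]
    cases d.get? (String.ofList name) <;> rfl
  | cons seg rest ih =>
    simp only [List.foldl_cons, List.map_cons, refLookup]
    cases hpe : partEqC seg.toList with
    | none =>
      have hnp : ((name ++ ['=']).isPrefixOf seg.toList) = false := by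
        apply Bool.eq_false_iff.2
        intro hpf
        have hmemEq : '=' ∈ seg.toList :=
          (List.isPrefixOf_iff_prefix.1 hpf).subset (by simp)
        exact (pv_partEqC_none seg.toList).1 hpe hmemEq
      rw [hnp]
      simp only [Bool.false_eq_true, if_false]
      exact ih d
    | some p =>
      obtain ⟨a, b⟩ := p
      obtain ⟨hseg, hafree⟩ := (pv_partEqC_some seg.toList a b).1 hpe
      by_cases ha : a = name
      · subst ha
        have hpf : ((a ++ ['=']).isPrefixOf seg.toList) = true := by
          rw [List.isPrefixOf_iff_prefix, hseg]
          exact ⟨b, by simp⟩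
        rw [hpf]
        simp only [if_pos]
        have hdropb : seg.toList.drop (a.length + 1) = b := by
          rw [hseg, ← List.drop_drop, List.drop_left]
          rfl
        have hcont : namesL.contains (String.ofList a) = true := by
          simpa [List.contains_iff_mem] using hmem
        by_cases hd : d.contains (String.ofList a) = true
        · obtain ⟨v, hv⟩ : ∃ v, d.get? (String.ofList a) = some v := by
            have := PySem.Dict.contains_eq_isSome_get? (d := d) (k := String.ofList a)
            rw [hd] at this
            exact Option.isSome_iff_exists.1 this.symm
          rw [hcont, hd]
          simp only [Bool.not_true, Bool.and_false, Bool.false_eq_true, if_false]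
          rw [ih d, hv]
          rfl
        · have hdf : d.contains (String.ofList a) = false := by
            simpa using hd
          have hget : d.get? (String.ofList a) = none := by
            have := PySem.Dict.contains_eq_isSome_get? (d := d) (k := String.ofList a)
            rw [hdf] at this
            cases hg : d.get? (String.ofList a) with
            | none => rfl
            | some v => rw [hg] at this; simp at this
          rw [hcont, hdf]
          simp only [Bool.not_false, Bool.and_true, if_pos]
          rw [ih _, PySem.Dict.get?_insert_self, hget, hdropb]
          rfl
      · have hne : String.ofList a ≠ String.ofList name := fun hh => ha (String.ofList_inj.1 hh)
        have hnp : ((name ++ ['=']).isPrefixOf seg.toList) = false := by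
          apply Bool.eq_false_iff.2
          intro hpf
          obtain ⟨u, hu⟩ := List.isPrefixOf_iff_prefix.1 hpf
          rw [hseg] at hu
          simp only [List.append_assoc, List.singleton_append] at hu
          exact ha ((pv_eqfree_unique a name b u hafree h2 hu).1.symm)
        rw [hnp]
        simp only [Bool.false_eq_true, if_false]
        by_cases hcnd : (namesL.contains (String.ofList a) && !(d.contains (String.ofList a))) = true
        · rw [hcnd]
          simp only [if_pos]
          rw [ih _, PySem.Dict.get?_insert_of_ne _ _ hne.symm]
        · rw [Bool.eq_false_iff.2 hcnd]
          simp only [Bool.false_eq_true, if_false]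
          exact ih d

def pvNamesC : List (List Char) :=
  [['r','e','s','i','d'], ['p','r','o','d'], ['c','l'], ['w','f'],
   ['l','l','_','t'], ['l','l','_','r'], ['l','l','_','h'], ['l','l','_','n'],
   ['s'], ['l','l']]

def pvCanon (q : String) : List (String × String) :=
  (pvNamesC.foldl (fun (d : PySem.Dict String String) n =>
      match Fref q.toList n with
      | some v => d.insert (String.ofList n) (String.ofList v)
      | none => d) PySem.Dict.empty).items

theorem pv_find_kv_eq' (q : String) (name : List Char) :
    find_kv q (String.ofList ('&' :: (name ++ ['=']))) =
      (match Fref q.toList name with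
       | some v => (true, String.ofList v)
       | none => (false, "")) := by
  have hq : String.ofList q.toList = q := String.ofList_toList
  conv_lhs => rw [← hq]
  exact pv_find_kv_eq q.toList name

theorem pv_slice_key (n : List Char) :
    PySem.Str.slice (String.ofList ('&' :: (n ++ ['=']))) (some 1) (some (-1)) = String.ofList n := by
  simp only [PySem.Str.slice, String.toList_ofList, PySem.Chars.slice_eq_listSlice,
    pv_slice_one_neg_one, List.tail_cons]
  rw [List.dropLast_concat]

theorem pv_A_canon (q : String) : query_process01 q = pvCanon q := by
  have hks : (["&resid=", "&prod=", "&cl=", "&wf=", "&ll_t=", "&ll_r=", "&ll_h=", "&ll_n=", "&s=", "&ll="] : List String) =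
      pvNamesC.map (fun n => String.ofList ('&' :: (n ++ ['=']))) := by decide
  simp only [query_process01, pvCanon, hks, List.foldl_map]
  apply congrArg
  apply PySem.List.foldl_congr_mem
  intro acc n _
  rw [pv_find_kv_eq' q n, pv_slice_key n]
  cases Fref q.toList n <;> simp

theorem pv_B_canon (q : String) : query_process01_alt q = pvCanon q := by
  have hnames : (["resid", "prod", "cl", "wf", "ll_t", "ll_r", "ll_h", "ll_n", "s", "ll"] : List String) =
      pvNamesC.map String.ofList := by decide
  have hsplit : PySem.Str.split? q "&" = some ((mySplit q.toList).map String.ofList) := by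
    simp [PySem.Str.split?, PySem.Chars.split?, show ("&" : String).toList = ['&'] from rfl,
      pv_splitOn_eq_mySplit]
  simp only [query_process01_alt, pvCanon, hsplit, pv_slice_one_neg_one, hnames, List.foldl_map]
  apply congrArg
  apply PySem.List.foldl_congr_mem
  intro acc n hn
  have hprops : n ≠ [] ∧ '&' ∉ n ∧ '=' ∉ n := by
    fin_cases hn <;> refine ⟨by decide, by decide, by decide⟩
  obtain ⟨hne, hamp, heq⟩ := hprops
  have hmem : String.ofList n ∈ pvNamesC.map String.ofList := List.mem_map_of_mem hn
  rw [pv_foldB_get? _ _ _ _ hmem heq]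
  rw [PySem.Dict.get?_empty]
  have hsegs : (((mySplit q.toList).map String.ofList).tail.dropLast).map String.toList =
      (mySplit q.toList).tail.dropLast := by
    rw [← List.map_tail, ← List.map_dropLast, List.map_map]
    simp only [Function.comp_def, String.toList_ofList]
    exact List.map_id _
  rw [hsegs, pv_refLookup_inner q.toList n hne hamp heq]
  cases Fref q.toList n <;> rfl

theorem pv_main (q : String) : query_process01 q = query_process01_alt q := by
  rw [pv_A_canon, pv_B_canon]

-- ===== VERDICT (by name: the statement is the Claim_ definition above) =====
theorem query_process01_spec : Claim_equal_query_process01 := by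
  intro q _
  unfold Spec_query_process01
  exact pv_main q
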